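-- pv_equiv track=rewrite | github.com/ll7/paf21-1 | components/global_planner/globalPlanerFirstDraft.py | findMaping
-- ===== SOURCE A (Python) =====
-- def findMaping(mapping, roadId, first):
--     index = 0
--     if first:
--         for map in mapping:
--             if map[0] == roadId:
--                 return index
--             index += 1
--         return -1
--     else:
--         found = False
--         for map in mapping:
--             if map[0] == roadId:
--                 index += 1
--         rec = findMaping(mapping, roadId, True)
--         if rec == None or rec == -1:
--             return -1
--         else:
--             return index + rec
-- ===== SOURCE B (Python) =====
-- def findMaping(mapping, roadId, first):
--     first_index = -1
--     count = 0
--     for i, m in enumerate(mapping):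
--         if m[0] == roadId:
--             count += 1
--             if first_index == -1:
--                 first_index = i
--                 if first:
--                     break
--     if first or first_index == -1:
--         return first_index
--     return count + first_index
-- ===== Notes on version B (the rewrite author's own statement) =====
-- stated objective: simpler
-- what changed: Replaced A's recursion (count loop plus a recursive first-match scan) with a single enumerate pass maintaining first match index and match count (breaking early when only the first index is wanted), combined at the end.
import Mathlib
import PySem

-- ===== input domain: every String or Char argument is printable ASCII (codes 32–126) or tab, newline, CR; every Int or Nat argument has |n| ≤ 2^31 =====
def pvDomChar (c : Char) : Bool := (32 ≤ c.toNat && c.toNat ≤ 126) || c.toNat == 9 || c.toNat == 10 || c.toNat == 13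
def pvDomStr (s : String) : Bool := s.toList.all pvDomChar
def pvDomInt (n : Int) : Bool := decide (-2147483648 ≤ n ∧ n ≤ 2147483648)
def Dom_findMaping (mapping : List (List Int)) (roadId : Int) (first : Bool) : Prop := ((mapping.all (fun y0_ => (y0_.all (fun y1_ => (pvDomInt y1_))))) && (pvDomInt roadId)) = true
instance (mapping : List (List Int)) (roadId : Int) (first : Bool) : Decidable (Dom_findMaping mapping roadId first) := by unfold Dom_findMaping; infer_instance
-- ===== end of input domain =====

-- B replaces A's recursion (count loop + recursive first-match scan) with one enumerate pass
-- keeping the first match index and the match count (breaking early when first=True);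
-- return value only, no mutation.


-- ===== PORT A =====
-- A's first=True loop: return the running index at the first m with m[0] == roadId, else -1.
-- (m[0] is PySem.List.pyGet? m 0; its `none` (IndexError) case is excluded by Pre_, defaulted to 0 here.)
def findAFirstLoop (mapping : List (List Int)) (roadId : Int) (index : Int) : Int :=
  match mapping with
  | [] => -1
  | m :: rest =>
      if (PySem.List.pyGet? m 0).getD 0 = roadId then index
      else findAFirstLoop rest roadId (index + 1)

def findMaping (mapping : List (List Int)) (roadId : Int) (first : Bool) : Int :=
  match first with
  | true => findAFirstLoop mapping roadId 0
  | false =>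
      -- count loop: index += 1 on every match
      let index := mapping.foldl
        (fun acc m => if (PySem.List.pyGet? m 0).getD 0 = roadId then acc + 1 else acc) 0
      let r := findMaping mapping roadId true
      -- Python's `rec == None` branch can never fire (the True call always returns an int)
      if r = -1 then -1 else index + r
termination_by if first then 0 else 1
decreasing_by simp

-- ===== PORT B =====
-- Source B's single enumerate loop: state (first_index, count); i is the enumerate counter;
-- the `break` when first=True is the early (i, c+1) return.
def altLoop (mapping : List (List Int)) (roadId : Int) (first : Bool) (i fi c : Int) : Int × Int :=
  match mapping with
  | [] => (fi, c)
  | m :: rest =>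
      if (PySem.List.pyGet? m 0).getD 0 = roadId then
        if fi = -1 then
          if first then (i, c + 1)  -- break
          else altLoop rest roadId first (i + 1) i (c + 1)
        else altLoop rest roadId first (i + 1) fi (c + 1)
      else altLoop rest roadId first (i + 1) fi c

def findMaping_alt (mapping : List (List Int)) (roadId : Int) (first : Bool) : Int :=
  let s := altLoop mapping roadId first 0 (-1) 0
  if first || s.1 = -1 then s.1 else s.2 + s.1

-- ===== PRECONDITION & SPEC =====
-- Pre_ excludes exactly the inputs on which A raises IndexError on m[0] of an empty row:
-- for first=False any empty row (the count loop touches every row), for first=True an empty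
-- row not strictly preceded by a matching row (the scan reaches it before returning).
def Pre_findMaping (mapping : List (List Int)) (roadId : Int) (first : Bool) : Prop :=
  if first then
    ∀ i ∈ List.range mapping.length, mapping.getD i [] = [] →
      ∃ j ∈ List.range i, mapping.getD j [] ≠ [] ∧ (mapping.getD j []).headD 0 = roadId
  else ∀ m ∈ mapping, m ≠ []
instance (mapping : List (List Int)) (roadId : Int) (first : Bool) : Decidable (Pre_findMaping mapping roadId first) := by unfold Pre_findMaping; infer_instance
def pvWitness_findMaping : List (List Int) × Int × Bool := ([[1, 5], [2], [1]], 1, false)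

def Spec_findMaping (mapping : List (List Int)) (roadId : Int) (first : Bool) (out : Int) : Prop := out = findMaping_alt mapping roadId first
instance (mapping : List (List Int)) (roadId : Int) (first : Bool) (out : Int) : Decidable (Spec_findMaping mapping roadId first out) := by unfold Spec_findMaping; infer_instance

-- ===== CLAIM (what is proved, stated in full; the proofs are below) =====
def Claim_equal_findMaping : Prop := ∀ (mapping : List (List Int)) (roadId : Int) (first : Bool), Dom_findMaping mapping roadId first → Pre_findMaping mapping roadId first → Spec_findMaping mapping roadId first (findMaping mapping roadId first)

-- ===== LEMMAS AND PROOFS =====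
-- with first=true the loop breaks at the first match: its first component is A's scan
theorem altLoop_true_fst (mapping : List (List Int)) (roadId i c : Int) :
    (altLoop mapping roadId true i (-1) c).1 = findAFirstLoop mapping roadId i := by
  induction mapping generalizing i c with
  | nil => simp [altLoop, findAFirstLoop]
  | cons m rest ih =>
      simp only [altLoop, findAFirstLoop]
      split
      · simp
      · exact ih (i + 1) c

-- first=false: once fi is set (≠ -1) it never changes
theorem altLoop_false_fst_set (mapping : List (List Int)) (roadId i fi c : Int) (h : fi ≠ -1) :
    (altLoop mapping roadId false i fi c).1 = fi := by
  induction mapping generalizing i c with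
  | nil => simp [altLoop]
  | cons m rest ih =>
      simp only [altLoop, if_neg h]
      split <;> exact ih _ _

-- first=false: while fi is unset, the first component is A's first-match scan from the same index
theorem altLoop_false_fst_unset (mapping : List (List Int)) (roadId i c : Int) (hi : 0 ≤ i) :
    (altLoop mapping roadId false i (-1) c).1 = findAFirstLoop mapping roadId i := by
  induction mapping generalizing i c hi with
  | nil => simp [altLoop, findAFirstLoop]
  | cons m rest ih =>
      simp only [altLoop, findAFirstLoop]
      split
      · simpa using altLoop_false_fst_set rest roadId (i + 1) i (c + 1) (by omega)
      · exact ih (i + 1) c (by omega)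

-- first=false: the second component is A's count fold continued from c
theorem altLoop_false_snd (mapping : List (List Int)) (roadId i fi c : Int) :
    (altLoop mapping roadId false i fi c).2 =
      mapping.foldl (fun acc m => if (PySem.List.pyGet? m 0).getD 0 = roadId then acc + 1 else acc) c := by
  induction mapping generalizing i fi c with
  | nil => simp [altLoop]
  | cons m rest ih =>
      simp only [altLoop, List.foldl]
      split
      · split
        · split
          · simp_all
          · simp_all
        · simp_all
      · simp_all

-- ===== VERDICT (by name: the statement is the Claim_ definition above) =====
theorem findMaping_spec : Claim_equal_findMaping := by
  intro mapping roadId first _ _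
  unfold Spec_findMaping
  cases first with
  | true =>
      simp only [findMaping, findMaping_alt, Bool.true_or]
      exact (altLoop_true_fst mapping roadId 0 0).symm
  | false =>
      simp only [findMaping, findMaping_alt, Bool.false_or]
      rw [show (altLoop mapping roadId false 0 (-1) 0).1 = findAFirstLoop mapping roadId 0 from
        altLoop_false_fst_unset mapping roadId 0 0 le_rfl,
        altLoop_false_snd mapping roadId 0 (-1) 0]
      by_cases hfi : findAFirstLoop mapping roadId 0 = -1 <;> simp [hfi]
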